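/-
  THE CONTRACTS OF libc (c/libc.c; design/CONTRACTS.md entries 10, 22, 23, 26, 36, 77, 80, 81, 91): `Spec`s over the shadow
  layer only. Ghost parameters of every Spec: `others`, `frames` — the live objects of the shadow invariant.

  The contracts are those of the shared package (ProgX/Spec/Libc.lean, stated for any program record `T : ProgX.Text`); the names of
  this file are their instances at `ProgX.Base.T` (abbreviations: a hypothesis about one is a hypothesis about the other).
-/
import ProgX.Base.Spec.Basic
import ProgX.Spec.Libc
namespace ProgX.Base.Spec
open X86 X86.User Asan

/-- **`memset(rdi = d, esi = c, rdx = n)`** (CONTRACTS 23), on the base image: the generic contract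
`ProgX.Spec.memset.spec` (ProgX/Spec/Libc.lean, where it is described) at the text record `ProgX.Base.T`. -/
abbrev memset.spec (others : List Obj) (frames : List (Nat × FrameLayout)) : Spec :=
  ProgX.Spec.memset.spec T others frames

/-- **`memcpy(rdi = d, rsi = s, rdx = n)`** (CONTRACTS 22), on the base image: the generic contract
`ProgX.Spec.memcpy.spec` (ProgX/Spec/Libc.lean, where it is described) at the text record `ProgX.Base.T`. -/
abbrev memcpy.spec (others : List Obj) (frames : List (Nat × FrameLayout)) : Spec :=
  ProgX.Spec.memcpy.spec T others frames

/-! The `vspec` rewrite rules (frame sizes, footprints) are the generic ones. -/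
export ProgX.Spec (
  memset.spec_frame memset.spec_writes memcpy.spec_frame memcpy.spec_writes)

end ProgX.Base.Spec
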